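-- pv_equiv track=rewrite | github.com/cpeluso/temporal-summarization | src/features/aligner.py | __find_closest_valid_character
-- ===== SOURCE A (Python) =====
-- import string
--
-- def __previous_character_is_valid(
--         text:  str,
--         index: int
-- ) -> bool:
--     return text[index - 1] == " " or text[index - 1] in string.punctuation and text[index].islower()
--
-- def __following_character_is_valid(
--         text:  str,
--         index: int
-- ) -> bool:
--     return len(text) - 1 == index or text[index] == " " or text[index] in string.punctuation
--
-- def __find_closest_valid_character(
--         text:    str,
--         index:   int,
--         default: str
-- ) -> int:
--     fwd_index = index
--     pvs_index = index
--
--     max_len = len(text)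
--
--     while not __previous_character_is_valid(text, pvs_index) and pvs_index > 0:
--         pvs_index -= 1
--
--     while not __following_character_is_valid(text, fwd_index) and fwd_index < max_len:
--         fwd_index += 1
--
--     fwd_error = abs(index - fwd_index)
--     pvs_error = abs(index - pvs_index)
--
--     if pvs_error < fwd_error:
--         return pvs_index
--
--     if fwd_error < pvs_error:
--         return fwd_index
--
--     if default == "P":
--         return pvs_index
--
--     if default == "F":
--         return fwd_index
--
--     raise Exception()
-- ===== SOURCE B (Python) =====
-- import string
--
-- def __previous_character_is_valid(text, index):
--     return text[index - 1] == " " or text[index - 1] in string.punctuation and text[index].islower()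
--
-- def __following_character_is_valid(text, index):
--     return len(text) - 1 == index or text[index] == " " or text[index] in string.punctuation
--
-- def __find_closest_valid_character(text, index, default):
--     max_len = len(text)
--     d = 0
--     while True:
--         left = index - d
--         right = index + d
--         if left <= 0 or __previous_character_is_valid(text, left):
--             if right >= max_len or __following_character_is_valid(text, right):
--                 # both sides close at the same distance: tie broken by default
--                 if default == "P":
--                     return left
--                 if default == "F":
--                     return right
--                 raise Exception()
--             return left
--         if right >= max_len or __following_character_is_valid(text, right):
--             return right
--         d += 1
-- ===== Notes on version B (the rewrite author's own statement) =====
-- stated objective: alternative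
-- what changed: A runs two independent directional while-loops to completion and then compares their distances; B runs a single expanding-radius loop (d = 0,1,2,...) that probes both boundaries at each distance and returns as soon as the first side closes, breaking a simultaneous close by the default.
import Mathlib
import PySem

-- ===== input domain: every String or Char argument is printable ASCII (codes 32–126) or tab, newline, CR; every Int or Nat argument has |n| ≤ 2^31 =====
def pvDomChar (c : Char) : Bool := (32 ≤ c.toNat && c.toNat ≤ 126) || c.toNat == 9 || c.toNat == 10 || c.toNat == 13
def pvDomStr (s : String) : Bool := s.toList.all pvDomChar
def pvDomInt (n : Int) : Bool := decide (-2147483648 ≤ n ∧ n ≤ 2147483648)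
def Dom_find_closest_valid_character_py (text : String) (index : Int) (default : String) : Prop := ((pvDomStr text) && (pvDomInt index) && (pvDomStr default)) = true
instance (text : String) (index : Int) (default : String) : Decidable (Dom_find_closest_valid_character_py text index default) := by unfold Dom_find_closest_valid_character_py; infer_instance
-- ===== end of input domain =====

-- B replaces A's two independent directional while-loops by a single expanding-radius scan that
-- returns at the first side that closes (objective: alternative decomposition, same asymptotic cost).

-- ===== PORT A =====
-- string.punctuation
def pvPunct : List Char := "!\"#$%&'()*+,-./:;<=>?@[\\]^_`{|}~".toList

-- __previous_character_is_valid; Python raises IndexError where pyGet? is none (excluded by Pre_)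
def pvPrevValid (cs : List Char) (i : Int) : Bool :=
  match PySem.List.pyGet? cs (i - 1) with
  | none => false
  | some c =>
    c == ' ' ||
      (pvPunct.contains c &&
        (match PySem.List.pyGet? cs i with
         | none => false
         | some c2 => PySem.Chars.islower c2))

-- __following_character_is_valid; Python raises IndexError where pyGet? is none (excluded by Pre_)
def pvFolValid (cs : List Char) (i : Int) : Bool :=
  if ((cs.length : Int) - 1) = i then true
  else
    match PySem.List.pyGet? cs i with
    | none => false
    | some c => c == ' ' || pvPunct.contains c

-- A's first while-loop (pvs_index scan, downwards)
def pvsLoopA (cs : List Char) (pvs : Int) : Int :=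
  if h : pvPrevValid cs pvs = false ∧ 0 < pvs then pvsLoopA cs (pvs - 1) else pvs
termination_by pvs.toNat
decreasing_by omega

-- A's second while-loop (fwd_index scan, upwards)
def fwdLoopA (cs : List Char) (maxLen : Int) (fwd : Int) : Int :=
  if h : pvFolValid cs fwd = false ∧ fwd < maxLen then fwdLoopA cs maxLen (fwd + 1) else fwd
termination_by (maxLen - fwd).toNat
decreasing_by omega

def find_closest_valid_character_py (text : String) (index : Int) (default : String) : Int :=
  let cs := text.toList
  let maxLen : Int := cs.length
  let pvs_index := pvsLoopA cs index
  let fwd_index := fwdLoopA cs maxLen index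
  let fwd_error := |index - fwd_index|
  let pvs_error := |index - pvs_index|
  if pvs_error < fwd_error then pvs_index
  else if fwd_error < pvs_error then fwd_index
  else if default = "P" then pvs_index
  else if default = "F" then fwd_index
  else 0  -- Python: raise Exception() — excluded by Pre_

-- ===== PORT B =====
-- B's single expanding-radius loop
def altLoopB (cs : List Char) (maxLen : Int) (index : Int) (default : String) (d : Nat) : Int :=
  let left := index - d
  let right := index + d
  if left ≤ 0 ∨ pvPrevValid cs left = true then
    if maxLen ≤ right ∨ pvFolValid cs right = true then
      -- both sides close at the same distance: tie broken by default
      if default = "P" then left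
      else if default = "F" then right
      else 0  -- Python: raise Exception() — excluded by Pre_
    else left
  else if maxLen ≤ right ∨ pvFolValid cs right = true then right
  else altLoopB cs maxLen index default (d + 1)
termination_by index.toNat - d
decreasing_by simp only [not_or, not_le, Bool.not_eq_true] at *; omega

def find_closest_valid_character_py_alt (text : String) (index : Int) (default : String) : Int :=
  altLoopB text.toList (text.toList.length : Int) index default 0

-- ===== PRECONDITION & SPEC =====
-- Pre_ is exactly the set of inputs on which A returns: for 0 ≤ index < len(text) A raises only
-- Exception, on a tie with default ∉ {"P","F"}; for 1-len(text) ≤ index < 0 Python's negative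
-- indexing makes A return index itself unless the forward side also stops at once and
-- default ∉ {"P","F"} (Exception again); all other indices hit an IndexError.
def Pre_find_closest_valid_character_py (text : String) (index : Int) (default : String) : Prop :=
  (0 ≤ index ∧ index < (text.toList.length : Int) ∧
    (default = "P" ∨ default = "F" ∨
      -- declarative "no tie": the two scans do not first close at the same distance d
      ¬ ∃ d ∈ Finset.range (index.toNat + 1),
          (index - (d:Int) ≤ 0 ∨ pvPrevValid text.toList (index - d) = true) ∧
          ((text.toList.length : Int) ≤ index + d ∨ pvFolValid text.toList (index + d) = true) ∧
          ∀ e : Nat, e < d →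
            ¬ (index - (e:Int) ≤ 0 ∨ pvPrevValid text.toList (index - e) = true) ∧
            ¬ ((text.toList.length : Int) ≤ index + e ∨ pvFolValid text.toList (index + e) = true))) ∨
  (1 - (text.toList.length : Int) ≤ index ∧ index < 0 ∧
    (default = "P" ∨ default = "F" ∨ pvFolValid text.toList index = false))
instance (text : String) (index : Int) (default : String) : Decidable (Pre_find_closest_valid_character_py text index default) := by unfold Pre_find_closest_valid_character_py; infer_instance

def pvWitness_find_closest_valid_character_py : String × Int × String := ("ab cd", 1, "P")

def Spec_find_closest_valid_character_py (text : String) (index : Int) (default : String) (out : Int) : Prop := out = find_closest_valid_character_py_alt text index default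
instance (text : String) (index : Int) (default : String) (out : Int) : Decidable (Spec_find_closest_valid_character_py text index default out) := by unfold Spec_find_closest_valid_character_py; infer_instance

-- ===== CLAIM (what is proved, stated in full; the proofs are below) =====
def Claim_equal_find_closest_valid_character_py : Prop := ∀ (text : String) (index : Int) (default : String), Dom_find_closest_valid_character_py text index default → Pre_find_closest_valid_character_py text index default → Spec_find_closest_valid_character_py text index default (find_closest_valid_character_py text index default)

-- ===== LEMMAS AND PROOFS =====

-- stop condition of the left scan, as both versions test it
def pvStopL (cs : List Char) (j : Int) : Prop := j ≤ 0 ∨ pvPrevValid cs j = true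

-- stop condition of the right scan
def pvStopR (cs : List Char) (maxLen : Int) (j : Int) : Prop := maxLen ≤ j ∨ pvFolValid cs j = true

lemma pvsLoopA_spec (cs : List Char) : ∀ (k : Nat) (i : Int), i = (k : Int) →
    pvsLoopA cs i ≤ i ∧ pvStopL cs (pvsLoopA cs i) ∧
      ∀ j : Int, pvsLoopA cs i < j → j ≤ i → ¬ pvStopL cs j := by
  intro k
  induction k with
  | zero =>
    intro i hi; subst hi
    rw [pvsLoopA, dif_neg (by simp)]
    exact ⟨le_refl _, Or.inl (by omega), fun j h1 h2 => absurd h1 (by omega)⟩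
  | succ m ih =>
    intro i hi
    rw [pvsLoopA]
    by_cases hc : pvPrevValid cs i = false ∧ 0 < i
    · rw [dif_pos hc]
      obtain ⟨h1, h3, h4⟩ := ih (i - 1) (by omega)
      refine ⟨by omega, h3, ?_⟩
      intro j hj1 hj2
      rcases lt_or_ge (i - 1) j with hcase | hcase
      · have : j = i := by omega
        subst this
        rintro (hs | hs)
        · omega
        · rw [hc.1] at hs; exact absurd hs (by simp)
      · exact h4 j hj1 (by omega)
    · rw [dif_neg hc]
      refine ⟨le_refl _, ?_, fun j h1 h2 => absurd h1 (by omega)⟩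
      by_cases hp : pvPrevValid cs i = true
      · exact Or.inr hp
      · have hp' : pvPrevValid cs i = false := by simpa using hp
        exact Or.inl (by by_contra h; exact hc ⟨hp', by omega⟩)

lemma fwdLoopA_spec (cs : List Char) (maxLen : Int) : ∀ (k : Nat) (i : Int), (maxLen - i).toNat = k →
    i ≤ fwdLoopA cs maxLen i ∧ pvStopR cs maxLen (fwdLoopA cs maxLen i) ∧
      ∀ j : Int, i ≤ j → j < fwdLoopA cs maxLen i → ¬ pvStopR cs maxLen j := by
  intro k
  induction k with
  | zero =>
    intro i hi
    rw [fwdLoopA, dif_neg (by omega)]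
    exact ⟨le_refl _, Or.inl (by omega), fun j h1 h2 => absurd h1 (by omega)⟩
  | succ m ih =>
    intro i hi
    rw [fwdLoopA]
    by_cases hc : pvFolValid cs i = false ∧ i < maxLen
    · rw [dif_pos hc]
      obtain ⟨h1, h2, h3⟩ := ih (i + 1) (by omega)
      refine ⟨by omega, h2, ?_⟩
      intro j hj1 hj2
      rcases lt_or_ge j (i + 1) with hcase | hcase
      · have : j = i := by omega
        subst this
        rintro (hs | hs)
        · omega
        · rw [hc.1] at hs; exact absurd hs (by simp)
      · exact h3 j hcase hj2
    · rw [dif_neg hc]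
      refine ⟨le_refl _, ?_, fun j h1 h2 => absurd h1 (by omega)⟩
      by_cases hp : pvFolValid cs i = true
      · exact Or.inr hp
      · have hp' : pvFolValid cs i = false := by simpa using hp
        exact Or.inl (by by_contra h; exact hc ⟨hp', by omega⟩)

lemma altLoopB_run (cs : List Char) (maxLen index : Int) (default : String) (P F : Int)
    (hP : P ≤ index) (hPs : pvStopL cs P)
    (hPmin : ∀ j : Int, P < j → j ≤ index → ¬ pvStopL cs j)
    (hF : index ≤ F) (hFs : pvStopR cs maxLen F)
    (hFmin : ∀ j : Int, index ≤ j → j < F → ¬ pvStopR cs maxLen j) :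
    ∀ (k : Nat) (d : Nat), (index - P).toNat - d = k → (d : Int) ≤ index - P → (d : Int) ≤ F - index →
      altLoopB cs maxLen index default d =
        (if index - P < F - index then P
         else if F - index < index - P then F
         else if default = "P" then P
         else if default = "F" then F
         else 0) := by
  intro k
  induction k with
  | zero =>
    intro d hk hdL hdR
    rw [altLoopB]
    have hleft : index - (d : Int) = P := by omega
    have hLok : index - (d : Int) ≤ 0 ∨ pvPrevValid cs (index - (d : Int)) = true := by
      rw [hleft]; exact hPs
    rw [if_pos hLok]
    by_cases htie : (d : Int) = F - index
    · have hright : index + (d : Int) = F := by omega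
      have hRok : maxLen ≤ index + (d : Int) ∨ pvFolValid cs (index + (d : Int)) = true := by
        rw [hright]; exact hFs
      rw [if_pos hRok, if_neg (by omega : ¬ index - P < F - index),
        if_neg (by omega : ¬ F - index < index - P)]
      split_ifs <;> omega
    · have hRnot : ¬ (maxLen ≤ index + (d : Int) ∨ pvFolValid cs (index + (d : Int)) = true) :=
        hFmin (index + d) (by omega) (by omega)
      rw [if_neg hRnot, if_pos (by omega : index - P < F - index)]
      omega
  | succ m ih =>
    intro d hk hdL hdR
    rw [altLoopB]
    have hLnot : ¬ (index - (d : Int) ≤ 0 ∨ pvPrevValid cs (index - (d : Int)) = true) :=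
      hPmin (index - d) (by omega) (by omega)
    rw [if_neg hLnot]
    by_cases hdr : (d : Int) = F - index
    · have hright : index + (d : Int) = F := by omega
      have hRok : maxLen ≤ index + (d : Int) ∨ pvFolValid cs (index + (d : Int)) = true := by
        rw [hright]; exact hFs
      rw [if_pos hRok, if_neg (by omega : ¬ index - P < F - index),
        if_pos (by omega : F - index < index - P)]
      omega
    · have hRnot : ¬ (maxLen ≤ index + (d : Int) ∨ pvFolValid cs (index + (d : Int)) = true) :=
        hFmin (index + d) (by omega) (by omega)
      rw [if_neg hRnot]
      exact ih (d + 1) (by omega) (by omega) (by omega)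

-- ===== VERDICT (by name: the statement is the Claim_ definition above) =====
theorem find_closest_valid_character_py_spec : Claim_equal_find_closest_valid_character_py := by
  intro text index default _hDom _hPre
  unfold Spec_find_closest_valid_character_py
  simp only [find_closest_valid_character_py, find_closest_valid_character_py_alt]
  rcases le_or_gt 0 index with hi0 | hineg
  · -- 0 ≤ index: both scans are characterised and B's radius loop is unrolled against them
    obtain ⟨hP1, hP3, hP4⟩ := pvsLoopA_spec text.toList index.toNat index (by omega)
    obtain ⟨hF1, hF2, hF3⟩ :=
      fwdLoopA_spec text.toList (text.toList.length : Int)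
        ((text.toList.length : Int) - index).toNat index rfl
    rw [altLoopB_run text.toList (text.toList.length : Int) index default
        (pvsLoopA text.toList index) (fwdLoopA text.toList (text.toList.length : Int) index)
        hP1 hP3 hP4 hF1 hF2 hF3 ((index - pvsLoopA text.toList index).toNat - 0) 0 rfl
        (by omega) (by omega)]
    rw [abs_of_nonneg (by omega : (0:Int) ≤ index - pvsLoopA text.toList index),
      abs_of_nonpos (by omega : index - fwdLoopA text.toList (text.toList.length : Int) index ≤ 0),
      neg_sub]
  · -- index < 0: A's backward scan stops at once, so both versions return index
    have hlen0 : (0:Int) ≤ (text.toList.length : Int) := by positivity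
    have hP : pvsLoopA text.toList index = index := by
      rw [pvsLoopA, dif_neg (by rintro ⟨-, h⟩; omega)]
    obtain ⟨hF1, hF2, hF3⟩ :=
      fwdLoopA_spec text.toList (text.toList.length : Int)
        ((text.toList.length : Int) - index).toNat index rfl
    rw [hP, altLoopB]
    rw [if_pos (Or.inl (by push_cast; omega))]
    by_cases hfol : pvFolValid text.toList index = true
    · have hF : fwdLoopA text.toList (text.toList.length : Int) index = index := by
        rw [fwdLoopA, dif_neg (by rintro ⟨h, -⟩; exact absurd hfol (by simp [h]))]
      rw [hF, if_pos (Or.inr (by push_cast; simpa using hfol)), sub_self, abs_zero,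
        if_neg (lt_irrefl (0:Int)), if_neg (lt_irrefl (0:Int))]
      split_ifs <;> push_cast <;> ring
    · have hfol' : pvFolValid text.toList index = false := by simpa using hfol
      have hFne : fwdLoopA text.toList (text.toList.length : Int) index ≠ index := by
        intro h
        have h2 := hF2
        rw [h] at h2
        simp only [pvStopR] at h2
        rcases h2 with h1 | h1
        · omega
        · rw [hfol'] at h1; exact Bool.false_ne_true h1
      have hFgt : index < fwdLoopA text.toList (text.toList.length : Int) index :=
        lt_of_le_of_ne hF1 (Ne.symm hFne)
      rw [if_neg (show ¬((text.toList.length : Int) ≤ index + ((0:Nat):Int) ∨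
          pvFolValid text.toList (index + ((0:Nat):Int)) = true) by
        rintro (h | h)
        · omega
        · simp only [Nat.cast_zero, add_zero] at h
          rw [hfol'] at h
          exact Bool.false_ne_true h)]
      rw [sub_self, abs_zero,
        abs_of_nonpos (by omega : index - fwdLoopA text.toList (text.toList.length : Int) index ≤ 0),
        neg_sub, if_pos (by omega : (0:Int) < fwdLoopA text.toList (text.toList.length : Int) index - index)]
      push_cast; ring
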